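-- pv_equiv track=rewrite | github.com/MrIbrahem/wd-core | dump/claims/do_text.py | make_numbers_section
-- ===== SOURCE A (Python) =====
-- def make_numbers_section(p31list):
--     xline = ""
--     yline = ""
--     # ---
--     rows = []
--     # ---
--     property_other = 0
--     # ---
--     n = 0
--     # ---
--     for Len, P in p31list:
--         n += 1
--         if n < 27:
--             xline += f",{P}"
--             yline += f",{Len}"
--         # ---
--         if len(rows) < 101:
--             Len = f"{Len:,}"
--             P = "{{P|%s}}" % P
--             lune = f"| {n} || {P} || {Len} "
--             rows.append(lune)
--         else:
--             property_other += int(Len)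
--     # ---
--     Chart2 = "{| class='floatright sortable' \n|-\n|"
--     Chart2 += "{{Graph:Chart|width=900|height=100|xAxisTitle=property|yAxisTitle=usage|type=rect\n"
--     Chart2 += f"|x={xline}\n|y1={yline}"
--     Chart2 += "\n}}"
--     Chart2 += "\n|-\n|}"
--     # ---
--     Chart2 = Chart2.replace("=,", "=")
--     # ---
--     rows.append(f"! {n} \n! others \n! {property_other:,}")
--     rows = "\n|-\n".join(rows)
--     table = (
--         "\n{| "
--         + f'class="wikitable sortable"\n|-\n! #\n! property\n! usage\n|-\n{rows}\n'
--         + "|}"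
--     )
--     # ---
--     text = "== Numbers ==\n" f"\n{Chart2}\n{table}"
--     # ---
--     return text
-- ===== SOURCE B (Python) =====
-- def make_numbers_section(p31list):
--     n = len(p31list)
--     head = p31list[:26]
--     xline = "".join("," + P for _, P in head)
--     yline = "".join("," + str(Len) for Len, _ in head)
--     rows = [
--         "| %d || {{P|%s}} || %s " % (i, P, format(Len, ","))
--         for i, (Len, P) in enumerate(p31list[:101], 1)
--     ]
--     property_other = sum(Len for Len, _ in p31list[101:])
--     rows.append("! %d \n! others \n! %s" % (n, format(property_other, ",")))
--     chart = (
--         "{| class='floatright sortable' \n|-\n|"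
--         "{{Graph:Chart|width=900|height=100|xAxisTitle=property|yAxisTitle=usage|type=rect\n"
--         "|x=%s\n|y1=%s\n}}\n|-\n|}" % (xline, yline)
--     ).replace("=,", "=")
--     table = (
--         '\n{| class="wikitable sortable"\n|-\n! #\n! property\n! usage\n|-\n'
--         + "\n|-\n".join(rows)
--         + "\n|}"
--     )
--     return "== Numbers ==\n\n%s\n%s" % (chart, table)
-- ===== Notes on version B (the rewrite author's own statement) =====
-- stated objective: alternative
-- what changed: A's single for-loop threading five mutable accumulators (counter, two chart strings, rows list, overflow sum) is replaced by independent slice-based passes: joins over the first 26 items for the chart lines, a list comprehension over enumerate of the first 101 items for the rows, and a sum over the tail from index 101.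
import Mathlib
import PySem

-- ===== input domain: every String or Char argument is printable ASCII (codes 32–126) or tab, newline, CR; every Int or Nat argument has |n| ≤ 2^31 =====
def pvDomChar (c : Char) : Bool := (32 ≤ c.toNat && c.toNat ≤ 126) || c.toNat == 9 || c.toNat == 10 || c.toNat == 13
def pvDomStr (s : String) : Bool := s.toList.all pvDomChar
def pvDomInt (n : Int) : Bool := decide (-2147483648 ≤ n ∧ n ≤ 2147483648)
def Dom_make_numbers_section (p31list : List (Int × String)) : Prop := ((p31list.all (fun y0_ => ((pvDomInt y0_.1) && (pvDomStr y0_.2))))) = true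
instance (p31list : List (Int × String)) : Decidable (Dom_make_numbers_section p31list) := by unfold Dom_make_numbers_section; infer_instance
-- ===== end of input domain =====

-- B replaces A's single counting loop (five mutable accumulators) by independent slice-based
-- passes (first-26 chart lines, first-101 enumerated rows, sum of the tail); objective: alternative decomposition, same output.


-- shared formatting helper: exact port of Python's f"{n:,}" / format(n, ",") for integers
-- (thousands separators every three digits from the right, '-' in front for negatives)
def pvCommaRev : List Char → Nat → List Char
  | [], _ => []
  | c :: rest, k => if k == 3 then ',' :: c :: pvCommaRev rest 1 else c :: pvCommaRev rest (k + 1)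

def commaFmt (n : Int) : String :=
  let s := String.ofList ((pvCommaRev (PySem.Int.toChars (n.natAbs : Int)).reverse 0).reverse)
  if n < 0 then "-" ++ s else s

-- ===== PORT A =====
-- one iteration of A's for-loop over the state (n, xline, yline, rows, property_other)
def stepA (st : Int × String × String × List String × Int) (lp : Int × String) :
    Int × String × String × List String × Int :=
  let (n, x, y, rows, po) := st
  let (Len, P) := lp
  let n := n + 1
  let xy := if n < 27 then (x ++ ("," ++ P), y ++ ("," ++ PySem.Int.toStr Len)) else (x, y)
  if rows.length < 101 then
    let LenS := commaFmt Len
    let PS := "{{P|" ++ P ++ "}}"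
    let lune := "| " ++ PySem.Int.toStr n ++ " || " ++ PS ++ " || " ++ LenS ++ " "
    (n, xy.1, xy.2, rows ++ [lune], po)
  else
    (n, xy.1, xy.2, rows, po + Len)  -- int(Len) where Len is still the int

def make_numbers_section (p31list : List (Int × String)) : String :=
  let st := p31list.foldl stepA (0, "", "", ([] : List String), 0)
  let n := st.1
  let xline := st.2.1
  let yline := st.2.2.1
  let rows := st.2.2.2.1
  let po := st.2.2.2.2
  let chart2 := "{| class='floatright sortable' \n|-\n|"
    ++ "{{Graph:Chart|width=900|height=100|xAxisTitle=property|yAxisTitle=usage|type=rect\n"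
    ++ ("|x=" ++ xline ++ "\n|y1=" ++ yline) ++ "\n}}" ++ "\n|-\n|}"
  let chart2 := PySem.Str.replace chart2 "=," "="
  let rows := rows ++ ["! " ++ PySem.Int.toStr n ++ " \n! others \n! " ++ commaFmt po]
  let rowsS := PySem.Str.join "\n|-\n" rows
  let table := "\n{| "
    ++ ("class=\"wikitable sortable\"\n|-\n! #\n! property\n! usage\n|-\n" ++ rowsS ++ "\n")
    ++ "|}"
  "== Numbers ==\n" ++ ("\n" ++ chart2 ++ "\n" ++ table)

-- ===== PORT B =====
def pvRowB (i Len : Int) (P : String) : String :=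
  "| " ++ PySem.Int.toStr i ++ " || {{P|" ++ P ++ "}} || " ++ commaFmt Len ++ " "

def make_numbers_section_alt (p31list : List (Int × String)) : String :=
  let n := (p31list.length : Int)
  let head := PySem.List.slice p31list none (some 26)
  let xline := PySem.Str.join "" (head.map (fun p => "," ++ p.2))
  let yline := PySem.Str.join "" (head.map (fun p => "," ++ PySem.Int.toStr p.1))
  let rows := (PySem.List.enumerate (PySem.List.slice p31list none (some 101)) 1).map
      (fun ip => pvRowB ip.1 ip.2.1 ip.2.2)
  let po := ((PySem.List.slice p31list (some 101) none).map Prod.fst).sum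
  let rows := rows ++ ["! " ++ PySem.Int.toStr n ++ " \n! others \n! " ++ commaFmt po]
  let chart := PySem.Str.replace
    ("{| class='floatright sortable' \n|-\n|{{Graph:Chart|width=900|height=100|xAxisTitle=property|yAxisTitle=usage|type=rect\n|x="
      ++ xline ++ "\n|y1=" ++ yline ++ "\n}}\n|-\n|}") "=," "="
  let table := "\n{| class=\"wikitable sortable\"\n|-\n! #\n! property\n! usage\n|-\n"
    ++ PySem.Str.join "\n|-\n" rows ++ "\n|}"
  "== Numbers ==\n\n" ++ chart ++ "\n" ++ table

-- ===== PRECONDITION & SPEC =====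
def Spec_make_numbers_section (p31list : List (Int × String)) (out : String) : Prop := out = make_numbers_section_alt p31list
instance (p31list : List (Int × String)) (out : String) : Decidable (Spec_make_numbers_section p31list out) := by unfold Spec_make_numbers_section; infer_instance

-- ===== CLAIM (what is proved, stated in full; the proofs are below) =====
def Claim_equal_make_numbers_section : Prop := ∀ (p31list : List (Int × String)), Dom_make_numbers_section p31list → Spec_make_numbers_section p31list (make_numbers_section p31list)

-- ===== LEMMAS AND PROOFS =====
theorem str_eq_of_toList {a b : String} (h : a.toList = b.toList) : a = b := by
  have := congrArg String.ofList h; simpa using this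

theorem flatten_intersperse_nil {α : Type} (L : List (List α)) :
    (List.intersperse [] L).flatten = L.flatten := by
  induction L with
  | nil => rfl
  | cons a t ih =>
    cases t with
    | nil => rfl
    | cons b t2 =>
      rw [show List.intersperse [] (a :: b :: t2) = a :: [] :: List.intersperse [] (b :: t2) by
            simp [List.intersperse]]
      simp only [List.flatten_cons] at *
      simp [ih]

theorem joinE_cons (a : String) (l : List String) :
    PySem.Str.join "" (a :: l) = a ++ PySem.Str.join "" l := by
  apply str_eq_of_toList
  simp [PySem.Str.toList_join, PySem.Chars.join, List.intercalate, flatten_intersperse_nil]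

theorem loopA_eq (l : List (Int × String)) : ∀ (k : Nat) (x y : String) (rows : List String) (po : Int),
    rows.length = min k 101 →
    l.foldl stepA ((k : Int), x, y, rows, po) =
      (((k + l.length : Nat) : Int),
       x ++ PySem.Str.join "" ((l.take (26 - k)).map (fun p => "," ++ p.2)),
       y ++ PySem.Str.join "" ((l.take (26 - k)).map (fun p => "," ++ PySem.Int.toStr p.1)),
       rows ++ (PySem.List.enumerate (l.take (101 - k)) ((k : Int) + 1)).map
         (fun ip => pvRowB ip.1 ip.2.1 ip.2.2),
       po + ((l.drop (101 - k)).map Prod.fst).sum) := by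
  induction l with
  | nil =>
    intro k x y rows po h
    simp [PySem.Str.join, PySem.Chars.join, List.intercalate]
  | cons hd tl ih =>
    intro k x y rows po h
    obtain ⟨Len, P⟩ := hd
    by_cases hk26 : k < 26
    · by_cases hk101 : k < 101
      · have hrows : rows.length < 101 := by omega
        have h26 : 26 - k = (26 - (k + 1)) + 1 := by omega
        have h101 : 101 - k = (101 - (k + 1)) + 1 := by omega
        rw [List.foldl_cons]
        have hstep : stepA ((k : Int), x, y, rows, po) (Len, P) =
            (((k + 1 : Nat) : Int), x ++ ("," ++ P), y ++ ("," ++ PySem.Int.toStr Len),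
             rows ++ [pvRowB ((k : Int) + 1) Len P], po) := by
          simp only [stepA]
          rw [if_pos hrows, if_pos (show ((k : Int) + 1 < 27) by omega)]
          refine Prod.ext (by push_cast [List.length_cons]; ring) (Prod.ext rfl (Prod.ext rfl (Prod.ext ?_ rfl)))
          exact congrArg (fun s => rows ++ [s]) (str_eq_of_toList (by simp [pvRowB]))
        rw [hstep, ih (k + 1) _ _ _ _ (by simp [h]; omega)]
        rw [h26, h101]
        simp only [List.take_succ_cons, List.map_cons, List.drop_succ_cons,
          PySem.List.enumerate_cons, joinE_cons, List.map_cons]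
        refine Prod.ext (by push_cast [List.length_cons]; ring) (Prod.ext ?_ (Prod.ext ?_ (Prod.ext ?_ rfl)))
        · simp [String.append_assoc]
        · simp [String.append_assoc]
        · push_cast
          rw [List.append_cons, List.append_assoc]
          simp
      · omega
    · by_cases hk101 : k < 101
      · have hrows : rows.length < 101 := by omega
        have h26 : 26 - k = 0 := by omega
        have h101 : 101 - k = (101 - (k + 1)) + 1 := by omega
        rw [List.foldl_cons]
        have hstep : stepA ((k : Int), x, y, rows, po) (Len, P) =
            (((k + 1 : Nat) : Int), x, y, rows ++ [pvRowB ((k : Int) + 1) Len P], po) := by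
          simp only [stepA]
          rw [if_pos hrows, if_neg (show ¬((k : Int) + 1 < 27) by omega)]
          refine Prod.ext (by push_cast [List.length_cons]; ring) (Prod.ext rfl (Prod.ext rfl (Prod.ext ?_ rfl)))
          exact congrArg (fun s => rows ++ [s]) (str_eq_of_toList (by simp [pvRowB]))
        rw [hstep, ih (k + 1) _ _ _ _ (by simp [h]; omega)]
        rw [h26, h101]
        have h26' : 26 - (k + 1) = 0 := by omega
        rw [h26']
        simp only [List.take_succ_cons, List.take_zero, List.map_nil, List.drop_succ_cons,
          PySem.List.enumerate_cons, List.map_cons]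
        refine Prod.ext (by push_cast [List.length_cons]; ring) (Prod.ext rfl (Prod.ext rfl (Prod.ext ?_ rfl)))
        push_cast
        rw [List.append_cons, List.append_assoc]
        simp
      · have hrows : ¬ rows.length < 101 := by omega
        have h26 : 26 - k = 0 := by omega
        have h101 : 101 - k = 0 := by omega
        rw [List.foldl_cons]
        have hstep : stepA ((k : Int), x, y, rows, po) (Len, P) =
            (((k + 1 : Nat) : Int), x, y, rows, po + Len) := by
          simp only [stepA]
          rw [if_neg hrows, if_neg (show ¬((k : Int) + 1 < 27) by omega)]
          exact Prod.ext (by push_cast [List.length_cons]; ring) rfl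
        rw [hstep, ih (k + 1) _ _ _ _ (by omega)]
        have h26' : 26 - (k + 1) = 0 := by omega
        have h101' : 101 - (k + 1) = 0 := by omega
        rw [h26, h101, h26', h101']
        refine Prod.ext (by push_cast [List.length_cons]; ring) (Prod.ext rfl (Prod.ext rfl (Prod.ext rfl ?_)))
        simp
        ring

-- ===== VERDICT (by name: the statement is the Claim_ definition above) =====
theorem make_numbers_section_spec : Claim_equal_make_numbers_section := by
  intro l _
  show make_numbers_section l = make_numbers_section_alt l
  simp only [make_numbers_section, make_numbers_section_alt]
  rw [show ((0 : Int), "", "", ([] : List String), (0 : Int))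
        = (((0 : Nat) : Int), "", "", ([] : List String), (0 : Int)) from rfl,
      loopA_eq l 0 "" "" [] 0 (by simp)]
  have hs26 : PySem.List.slice l none (some 26) = l.take 26 := by
    rw [show (26 : Int) = ((26 : Nat) : Int) by norm_num, PySem.List.slice_to_natCast]
  have hs101 : PySem.List.slice l none (some 101) = l.take 101 := by
    rw [show (101 : Int) = ((101 : Nat) : Int) by norm_num, PySem.List.slice_to_natCast]
  have hsfrom : PySem.List.slice l (some 101) none = l.drop 101 := by
    rw [show (101 : Int) = ((101 : Nat) : Int) by norm_num, PySem.List.slice_from_natCast]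
  rw [hs26, hs101, hsfrom]
  norm_num
  have hc : ∀ x y : String,
      "{| class='floatright sortable' \n|-\n|"
        ++ "{{Graph:Chart|width=900|height=100|xAxisTitle=property|yAxisTitle=usage|type=rect\n"
        ++ ("|x=" ++ x ++ "\n|y1=" ++ y) ++ "\n}}" ++ "\n|-\n|}"
      = "{| class='floatright sortable' \n|-\n|{{Graph:Chart|width=900|height=100|xAxisTitle=property|yAxisTitle=usage|type=rect\n|x="
        ++ x ++ "\n|y1=" ++ y ++ "\n}}\n|-\n|}" := by
    intro x y; apply str_eq_of_toList; simp
  rw [hc]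
  apply str_eq_of_toList
  simp
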